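-- pv_equiv track=rewrite | github.com/jwk1215/Python-exercise | pibo.py | pibonacci
-- ===== SOURCE A (Python) =====
-- def pibonacci(pibo):
--     pibo_sum = 0
--     for i in range(2,20):
--         num = pibo[-1]+pibo[-2]
--         pibo.append(num)
--
--     for i in range(0,len(pibo)):
--         pibo_sum += pibo[i]
--
--     return pibo_sum
-- ===== SOURCE B (Python) =====
-- # Closed form: the 18 appended fibonacci-like terms sum to 6764*pibo[-2] + 10944*pibo[-1],
-- # so the total is sum(pibo) + those; unlike A this does not mutate pibo (return value only).
-- def pibonacci(pibo):
--     return sum(pibo) + 6764 * pibo[-2] + 10944 * pibo[-1]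
-- ===== Notes on version B (the rewrite author's own statement) =====
-- stated objective: alternative
-- what changed: Replaces A's build-18-fibonacci-terms loop plus a second indexed summing loop by a single closed-form expression sum(pibo) + 6764*pibo[-2] + 10944*pibo[-1], using the Fibonacci partial-sum identity for the 18 appended terms (B does not mutate pibo; equivalence is about the return value).
import Mathlib
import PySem

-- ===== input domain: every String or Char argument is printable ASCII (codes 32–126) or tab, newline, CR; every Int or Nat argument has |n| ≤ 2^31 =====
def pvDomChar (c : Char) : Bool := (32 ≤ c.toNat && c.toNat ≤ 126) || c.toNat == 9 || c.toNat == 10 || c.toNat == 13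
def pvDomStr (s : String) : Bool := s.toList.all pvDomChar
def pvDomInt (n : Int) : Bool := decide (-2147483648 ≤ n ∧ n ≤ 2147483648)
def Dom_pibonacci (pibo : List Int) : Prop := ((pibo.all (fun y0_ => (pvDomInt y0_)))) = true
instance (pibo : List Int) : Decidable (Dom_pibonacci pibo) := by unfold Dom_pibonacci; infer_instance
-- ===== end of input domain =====

-- B replaces A's append-18-terms-then-sum loops by a closed form for the appended terms'
-- sum; equivalence is about the RETURN value only (A appends 18 elements to pibo, B does not mutate it).

-- ===== PORT A =====
-- one iteration of A's first loop body: num = pibo[-1] + pibo[-2]; pibo.append(num)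
def piboStep (l : List Int) : List Int :=
  l ++ [PySem.List.pyGetD l (-1) 0 + PySem.List.pyGetD l (-2) 0]

def pibonacci (pibo : List Int) : Int :=
  let pibo2 := (PySem.List.pyRange 2 20 1).foldl (fun l _ => piboStep l) pibo
  (PySem.List.pyRange 0 (pibo2.length : Int) 1).foldl
    (fun s i => s + PySem.List.pyGetD pibo2 i 0) 0

-- ===== PORT B =====
def pibonacci_alt (pibo : List Int) : Int :=
  pibo.sum + 6764 * PySem.List.pyGetD pibo (-2) 0 + 10944 * PySem.List.pyGetD pibo (-1) 0

-- ===== PRECONDITION & SPEC =====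
-- A (and B) raise IndexError on pibo[-1]/pibo[-2] when the list has fewer than two elements.
def Pre_pibonacci (pibo : List Int) : Prop := 2 ≤ pibo.length
instance (pibo : List Int) : Decidable (Pre_pibonacci pibo) := by unfold Pre_pibonacci; infer_instance
def pvWitness_pibonacci : List Int := [1, 1]

def Spec_pibonacci (pibo : List Int) (out : Int) : Prop := out = pibonacci_alt pibo
instance (pibo : List Int) (out : Int) : Decidable (Spec_pibonacci pibo out) := by unfold Spec_pibonacci; infer_instance

-- ===== CLAIM (what is proved, stated in full; the proofs are below) =====
def Claim_equal_pibonacci : Prop := ∀ (pibo : List Int), Dom_pibonacci pibo → Pre_pibonacci pibo → Spec_pibonacci pibo (pibonacci pibo)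

-- ===== LEMMAS AND PROOFS =====

-- sum of [a, b] and the 0..n-1 further fibonacci-like terms after it, minus the prefix
def piboS : Nat → Int → Int → Int
  | 0, a, b => a + b
  | n + 1, a, b => a + piboS n b (a + b)

theorem piboStep_append (l : List Int) (a b : Int) :
    piboStep (l ++ [a, b]) = (l ++ [a]) ++ [b, a + b] := by
  have h2 : (2 : Nat) ≤ (l ++ [a, b]).length := by simp
  have hb : PySem.List.pyGetD (l ++ [a, b]) (-1) 0 = b := by
    have : l ++ [a, b] = (l ++ [a]) ++ [b] := by simp
    rw [this, PySem.List.pyGetD_neg_one_append_singleton]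
  have ha : PySem.List.pyGetD (l ++ [a, b]) (-2) 0 = a := by
    rw [PySem.List.pyGetD_neg_ofNat _ 2 0 (by omega) h2]
    simp
  simp [piboStep, ha, hb]
  exact add_comm b a

theorem foldl_const_eq_iterate (r : List Int) (init : List Int) :
    r.foldl (fun l _ => piboStep l) init = piboStep^[r.length] init := by
  induction r generalizing init with
  | nil => simp
  | cons x xs ih => simp [List.foldl_cons, ih, Function.iterate_succ_apply]

theorem iterate_sum (n : Nat) : ∀ (l : List Int) (a b : Int),
    (piboStep^[n] (l ++ [a, b])).sum = l.sum + piboS n a b := by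
  induction n with
  | zero => intro l a b; simp [piboS]
  | succ n ih =>
    intro l a b
    rw [Function.iterate_succ_apply, piboStep_append, ih]
    simp [piboS]; ring

theorem piboS_closed (a b : Int) : piboS 18 a b = 6765 * a + 10945 * b := by
  simp [piboS]; ring

theorem pibonacci_spec : Claim_equal_pibonacci := by
  intro pibo _hdom hpre
  unfold Spec_pibonacci
  have hlen : 2 ≤ pibo.length := hpre
  -- decompose pibo = l ++ [a, b]
  rcases hr : pibo.reverse with _ | ⟨b, rest⟩
  · exfalso
    have h0 : pibo.reverse.length = 0 := by rw [hr]; rfl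
    rw [List.length_reverse] at h0; omega
  rcases rest with _ | ⟨a, t⟩
  · exfalso
    have h0 : pibo.reverse.length = 1 := by rw [hr]; rfl
    rw [List.length_reverse] at h0; omega
  have hp : pibo = t.reverse ++ [a, b] := by
    have := congrArg List.reverse hr; simpa using this
  subst hp
  -- evaluate port A
  unfold pibonacci
  have hlen18 : (PySem.List.pyRange 2 20 1).length = 18 := by decide
  rw [foldl_const_eq_iterate, hlen18]
  rw [PySem.List.foldl_pyRange_zero_pyGetD' _ 0 (fun s x => s + x) 0]
  rw [← List.sum_eq_foldl, iterate_sum 18 t.reverse a b, piboS_closed]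
  -- evaluate port B
  unfold pibonacci_alt
  have hb : PySem.List.pyGetD (t.reverse ++ [a, b]) (-1) 0 = b := by
    have : t.reverse ++ [a, b] = (t.reverse ++ [a]) ++ [b] := by simp
    rw [this, PySem.List.pyGetD_neg_one_append_singleton]
  have ha : PySem.List.pyGetD (t.reverse ++ [a, b]) (-2) 0 = a := by
    rw [PySem.List.pyGetD_neg_ofNat _ 2 0 (by omega) (by simp)]
    simp
  rw [ha, hb]
  simp; ring
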